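-- pv_equiv track=rewrite | github.com/shekhar2010us/trading | common/utilities.py | remove_terminal_stopwords
-- ===== SOURCE A (Python) =====
-- def remove_terminal_stopwords(text, stopwords):
--     text = text.strip()
--     tokens = text.split(' ')
--
--     # strip stopwords from left
--     n = 0
--     while n < len(tokens) and tokens[n] in stopwords:
--         n = n + 1
--     # created new token array with {left striped stopwords}
--     tokens = tokens[n:]
--
--     # strip stopwords from right
--     n = len(tokens) - 1
--     while n > 0 and tokens[n] in stopwords:
--         n = n - 1
--     # created new token array with {right striped stopwords}
--     tokens = tokens[0:n + 1]
--
--     return ' '.join(tokens).strip()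
-- ===== SOURCE B (Python) =====
-- def remove_terminal_stopwords(text, stopwords):
--     tokens = text.strip().split(' ')
--     # indices of the tokens that are not stopwords, in one forward pass
--     idx = [i for i, t in enumerate(tokens) if t not in stopwords]
--     if not idx:
--         return ''
--     return ' '.join(tokens[idx[0]:idx[-1] + 1]).strip()
-- ===== Notes on version B (the rewrite author's own statement) =====
-- stated objective: simpler
-- what changed: B replaces A's two end-trimming while loops (left index walk, then right index walk on the re-sliced list) by a single forward pass collecting the indices of non-stopword tokens and one boundary slice tokens[first:last+1].
import Mathlib
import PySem

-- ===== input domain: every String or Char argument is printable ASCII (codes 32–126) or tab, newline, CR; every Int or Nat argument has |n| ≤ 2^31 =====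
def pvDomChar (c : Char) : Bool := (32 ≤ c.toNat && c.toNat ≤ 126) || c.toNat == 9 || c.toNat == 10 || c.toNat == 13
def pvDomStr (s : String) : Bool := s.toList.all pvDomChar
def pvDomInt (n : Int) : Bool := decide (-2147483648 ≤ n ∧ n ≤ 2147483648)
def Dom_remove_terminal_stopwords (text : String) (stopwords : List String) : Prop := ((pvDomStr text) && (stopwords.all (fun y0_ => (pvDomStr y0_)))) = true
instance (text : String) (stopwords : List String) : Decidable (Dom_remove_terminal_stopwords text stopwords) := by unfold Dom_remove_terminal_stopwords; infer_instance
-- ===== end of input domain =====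

-- B replaces A's two end-trimming while loops with one forward pass collecting non-stopword
-- indices plus a single boundary slice (objective: simpler); return values proved equal everywhere.


-- ===== PORT A =====
-- 'while n < len(tokens) and tokens[n] in stopwords: n += 1' followed by 'tokens = tokens[n:]'
def pvDropLeft (stopwords : List String) : List String → List String
  | [] => []
  | t :: rest => if t ∈ stopwords then pvDropLeft stopwords rest else t :: rest

-- 'n = len(tokens) - 1; while n > 0 and tokens[n] in stopwords: n -= 1' (index always in range)
def pvRightIdx (stopwords tokens : List String) : Nat → Nat
  | 0 => 0
  | m + 1 => if tokens.getD (m + 1) "" ∈ stopwords then pvRightIdx stopwords tokens m else m + 1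

-- 'tokens = tokens[0:n+1]' (n = -1 only when tokens is empty, where the slice is tokens itself)
def pvRightTrim (stopwords tokens : List String) : List String :=
  match tokens.length with
  | 0 => tokens
  | m + 1 => tokens.take (pvRightIdx stopwords tokens m + 1)

def remove_terminal_stopwords (text : String) (stopwords : List String) : String :=
  -- text.strip().split(' '): the separator " " is never empty, so split? is always some
  let tokens := (PySem.Str.split? (PySem.Str.strip text) " ").getD []
  let tokens := pvDropLeft stopwords tokens
  let tokens := pvRightTrim stopwords tokens
  PySem.Str.strip (PySem.Str.join " " tokens)

-- ===== PORT B =====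
-- '[i for i, t in enumerate(tokens) if t not in stopwords]'
def pvNonStopIdx (stopwords tokens : List String) : List Int :=
  ((PySem.List.enumerate tokens 0).filter (fun p => decide (p.2 ∉ stopwords))).map Prod.fst

def remove_terminal_stopwords_alt (text : String) (stopwords : List String) : String :=
  let tokens := (PySem.Str.split? (PySem.Str.strip text) " ").getD []
  match pvNonStopIdx stopwords tokens with
  | [] => ""
  | i :: rest =>   -- idx[0] = i, idx[-1] = rest.getLastD i
      PySem.Str.strip (PySem.Str.join " "
        (PySem.List.slice tokens (some i) (some (rest.getLastD i + 1))))

-- ===== PRECONDITION & SPEC =====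
def Spec_remove_terminal_stopwords (text : String) (stopwords : List String) (out : String) : Prop := out = remove_terminal_stopwords_alt text stopwords
instance (text : String) (stopwords : List String) (out : String) : Decidable (Spec_remove_terminal_stopwords text stopwords out) := by unfold Spec_remove_terminal_stopwords; infer_instance

-- ===== CLAIM (what is proved, stated in full; the proofs are below) =====
def Claim_equal_remove_terminal_stopwords : Prop := ∀ (text : String) (stopwords : List String), Dom_remove_terminal_stopwords text stopwords → Spec_remove_terminal_stopwords text stopwords (remove_terminal_stopwords text stopwords)

-- ===== LEMMAS AND PROOFS =====

-- membership in B's index list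
theorem mem_pvNonStopIdx (sw ts : List String) (j : Int) :
    j ∈ pvNonStopIdx sw ts ↔ ∃ (k : Nat), k < ts.length ∧ j = (k : Int) ∧ ts.getD k "" ∉ sw := by
  unfold pvNonStopIdx
  simp only [List.mem_map, List.mem_filter, PySem.List.mem_enumerate_iff]
  constructor
  · rintro ⟨⟨a, b⟩, ⟨⟨k, hk, hp⟩, hb⟩, rfl⟩
    rw [Prod.mk.injEq] at hp
    obtain ⟨rfl, rfl⟩ := hp
    refine ⟨k, hk, by simp, ?_⟩
    simpa [List.getD_eq_getElem?_getD, List.getElem?_eq_getElem hk] using of_decide_eq_true hb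
  · rintro ⟨k, hk, rfl, hns⟩
    refine ⟨((k : Int), ts[k]), ⟨⟨k, hk, by simp⟩, ?_⟩, rfl⟩
    simp only [decide_eq_true_eq]
    simpa [List.getD_eq_getElem?_getD, List.getElem?_eq_getElem hk] using hns

theorem pairwise_pvNonStopIdx (sw ts : List String) :
    (pvNonStopIdx sw ts).Pairwise (· < ·) := by
  unfold pvNonStopIdx
  exact List.pairwise_map.mpr ((PySem.List.pairwise_lt_enumerate ts 0).filter _)

theorem le_getLast?_of_pairwise_lt : ∀ (l : List Int) (y : Int), l.getLast? = some y →
    l.Pairwise (· < ·) → ∀ x ∈ l, x ≤ y := by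
  intro l
  induction l with
  | nil => intro y hy; simp at hy
  | cons a t ih =>
    intro y hy hp x hx
    cases t with
    | nil =>
      simp at hy hx
      omega
    | cons b u =>
      cases ht : (b :: u).getLast? with
      | none => simp [List.getLast?_cons] at ht
      | some z =>
        have hyz : y = z := by
          rw [List.getLast?_cons, ht] at hy
          simpa using hy.symm
        subst hyz
        rcases List.mem_cons.mp hx with rfl | hxt
        · have hz : y ∈ b :: u := List.mem_of_getLast? ht
          exact le_of_lt ((List.pairwise_cons.mp hp).1 y hz)
        · exact ih y ht (List.Pairwise.of_cons hp) x hxt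

-- A's left while loop removes everything when every token is a stopword
theorem pvDropLeft_eq_nil (sw : List String) : ∀ (ts : List String),
    (∀ t ∈ ts, t ∈ sw) → pvDropLeft sw ts = [] := by
  intro ts
  induction ts with
  | nil => intro _; rfl
  | cons t rest ih =>
    intro h
    simp only [pvDropLeft, h t (by simp), if_true]
    exact ih (fun x hx => h x (by simp [hx]))

-- A's left while loop drops exactly the all-stopword prefix
theorem pvDropLeft_eq_drop (sw : List String) : ∀ (ts : List String) (f : Nat),
    f < ts.length → (∀ k, k < f → ts.getD k "" ∈ sw) → ts.getD f "" ∉ sw →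
    pvDropLeft sw ts = ts.drop f := by
  intro ts
  induction ts with
  | nil => intro f hf; simp at hf
  | cons t rest ih =>
    intro f hf hpre hf2
    cases f with
    | zero =>
      simp only [List.getD_cons_zero] at hf2
      simp [pvDropLeft, hf2]
    | succ g =>
      have ht : t ∈ sw := by simpa using hpre 0 (Nat.succ_pos g)
      simp only [pvDropLeft, ht, if_true, List.drop_succ_cons]
      exact ih g (by simpa using hf) (fun k hk => by simpa using hpre (k + 1) (by omega))
        (by simpa using hf2)

-- A's right while loop stops at the last non-stopword index
theorem pvRightIdx_eq (sw l : List String) : ∀ (m r : Nat), r ≤ m →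
    l.getD r "" ∉ sw → (∀ k, r < k → k ≤ m → l.getD k "" ∈ sw) →
    pvRightIdx sw l m = r := by
  intro m
  induction m with
  | zero => intro r hr _ _; interval_cases r; rfl
  | succ n ih =>
    intro r hr hrns hsuf
    by_cases h : r = n + 1
    · subst h
      simp only [pvRightIdx]
      rw [if_neg hrns]
    · have : l.getD (n + 1) "" ∈ sw := hsuf (n + 1) (by omega) le_rfl
      simp only [pvRightIdx]
      rw [if_pos this]
      exact ih r (by omega) hrns (fun k hk1 hk2 => hsuf k hk1 (by omega))

theorem empty_join_strip : PySem.Str.strip (PySem.Str.join " " ([] : List String)) = "" := by decide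

-- the heart: A's double trim equals B's boundary slice, for every token list
theorem trim_eq_slice (sw ts : List String) :
    PySem.Str.strip (PySem.Str.join " " (pvRightTrim sw (pvDropLeft sw ts))) =
      (match pvNonStopIdx sw ts with
       | [] => ""
       | i :: rest =>
           PySem.Str.strip (PySem.Str.join " "
             (PySem.List.slice ts (some i) (some (rest.getLastD i + 1))))) := by
  cases hidx : pvNonStopIdx sw ts with
  | nil =>
    have hall : ∀ t ∈ ts, t ∈ sw := by
      intro t ht
      by_contra hns
      obtain ⟨k, hk, rfl⟩ := List.mem_iff_getElem.mp ht
      have : (k : Int) ∈ pvNonStopIdx sw ts := (mem_pvNonStopIdx sw ts _).mpr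
        ⟨k, hk, rfl, by simpa [List.getD_eq_getElem?_getD, List.getElem?_eq_getElem hk] using hns⟩
      simp [hidx] at this
    rw [pvDropLeft_eq_nil sw ts hall]
    exact empty_join_strip
  | cons i rest =>
    -- i is the first non-stopword index f, rest.getLastD i the last one g
    have hi : i ∈ pvNonStopIdx sw ts := by simp [hidx]
    obtain ⟨f, hf, rfl, hfns⟩ := (mem_pvNonStopIdx sw ts i).mp hi
    have hlast? : (pvNonStopIdx sw ts).getLast? = some (rest.getLastD (f : Int)) := by
      rw [hidx]
      simp [List.getLast?_cons, List.getLastD_eq_getLast?]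
    have hlastmem : rest.getLastD (f : Int) ∈ pvNonStopIdx sw ts := by
      have := List.mem_of_getLast? hlast?
      exact this
    obtain ⟨g, hg, hgl, hgns⟩ := (mem_pvNonStopIdx sw ts _).mp hlastmem
    have hmax : ∀ (j : Int), j ∈ pvNonStopIdx sw ts → j ≤ (g : Int) := by
      intro j hj
      have := le_getLast?_of_pairwise_lt _ _ hlast? (pairwise_pvNonStopIdx sw ts) j hj
      omega
    have hmin : ∀ (j : Int), j ∈ pvNonStopIdx sw ts → (f : Int) ≤ j := by
      intro j hj
      rw [hidx] at hj
      rcases List.mem_cons.mp hj with rfl | hjr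
      · exact le_rfl
      · have hp := pairwise_pvNonStopIdx sw ts
        rw [hidx] at hp
        exact le_of_lt ((List.pairwise_cons.mp hp).1 j hjr)
    have hfg : f ≤ g := by
      have := hmax _ hi
      exact_mod_cast this
    have hpre : ∀ k, k < f → ts.getD k "" ∈ sw := by
      intro k hk
      by_contra hns
      have : (f : Int) ≤ (k : Int) := hmin _ ((mem_pvNonStopIdx sw ts _).mpr ⟨k, by omega, rfl, hns⟩)
      omega
    have hsufa : ∀ k, g < k → k < ts.length → ts.getD k "" ∈ sw := by
      intro k hk1 hk2
      by_contra hns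
      have : (k : Int) ≤ (g : Int) := hmax _ ((mem_pvNonStopIdx sw ts _).mpr ⟨k, hk2, rfl, hns⟩)
      omega
    -- A's left trim
    rw [pvDropLeft_eq_drop sw ts f hf hpre hfns]
    -- A's right trim on the dropped list
    have hlen : (ts.drop f).length = ts.length - f := List.length_drop ..
    have hgetDdrop : ∀ k, (ts.drop f).getD k "" = ts.getD (f + k) "" := by
      intro k
      rw [List.getD_eq_getElem?_getD, List.getD_eq_getElem?_getD, List.getElem?_drop]
    obtain ⟨m, hm⟩ : ∃ m, (ts.drop f).length = m + 1 := ⟨(ts.drop f).length - 1, by omega⟩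
    have hridx : pvRightIdx sw (ts.drop f) m = g - f := by
      apply pvRightIdx_eq
      · omega
      · rw [hgetDdrop (g - f)]
        have hgf : f + (g - f) = g := by omega
        rwa [hgf]
      · intro k hk1 hk2
        rw [hgetDdrop k]
        exact hsufa (f + k) (by omega) (by omega)
    have hA : pvRightTrim sw (ts.drop f) = (ts.drop f).take (g - f + 1) := by
      unfold pvRightTrim
      rw [hm]
      show List.take (pvRightIdx sw (ts.drop f) m + 1) (ts.drop f) = _
      rw [hridx]
    rw [hA]
    -- B's slice
    have hcast : rest.getLastD (f : Int) + 1 = ((g + 1 : Nat) : Int) := by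
      rw [hgl]; push_cast; ring
    show _ = PySem.Str.strip (PySem.Str.join " "
      (PySem.List.slice ts (some ((f : Nat) : Int)) (some (rest.getLastD ((f : Nat) : Int) + 1))))
    rw [hcast, PySem.List.slice_natCast]
    have hgfa : g + 1 - f = g - f + 1 := by omega
    rw [hgfa]

-- ===== VERDICT (by name: the statement is the Claim_ definition above) =====
theorem remove_terminal_stopwords_spec : Claim_equal_remove_terminal_stopwords := by
  intro text stopwords _
  unfold Spec_remove_terminal_stopwords remove_terminal_stopwords remove_terminal_stopwords_alt
  exact trim_eq_slice stopwords ((PySem.Str.split? (PySem.Str.strip text) " ").getD [])
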